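-- pv_equiv track=rewrite | github.com/rmorriscpux/daily-coding-challenges | challenge_289.py | hasForcedWin
-- ===== SOURCE A (Python) =====
-- from typing import List
--
-- def hasForcedWin(heaps: List[int]) -> bool:
--     # Assert all positive integers in non-empty list.
--     assert heaps
--     assert all(map(lambda i: i > 0, heaps))
--     # Misere rule: Player who takes the last item loses. A special case needs to be made for when all heaps contain just 1 item.
--     if all(map(lambda i: i == 1, heaps)):
--         return not(len(heaps) % 2) # True if number of heaps is even, False if number of heaps is odd.
--     # Get bitwise XOR value of the initial state.
--     xor_val = 0
--     for h in heaps: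
--         xor_val ^= h
--     # If the XOR of xor_val and a given heap is less than the total items in that heap,
--     # then it is possible to remove items from that heap such that the overall XOR value of all heaps is 0.
--     for h in heaps:
--         if xor_val ^ h < h:
--             return True
--
--     return False
-- ===== SOURCE B (Python) =====
-- from typing import List
--
-- def hasForcedWin(heaps: List[int]) -> bool:
--     assert heaps
--     assert all(map(lambda i: i > 0, heaps))
--     # Misere special case: every heap holds a single item.
--     if max(heaps) == 1:
--         return len(heaps) % 2 == 0
--     # Column-wise bit counting: a forced win exists iff some bit position is
--     # set in an odd number of heaps (i.e. the nim-sum is nonzero).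
--     width = max(h.bit_length() for h in heaps)
--     for b in range(width):
--         if sum((h >> b) & 1 for h in heaps) % 2 == 1:
--             return True
--     return False
-- ===== Notes on version B (the rewrite author's own statement) =====
-- stated objective: alternative
-- what changed: A folds the heaps into a running XOR and then scans for a heap h with xor^h < h; B never computes a nim-sum: it counts, column by column, how many heaps have each bit position set and answers True iff some column count is odd (and tests the misere all-ones case via max(heaps)==1 instead of an all()-scan).
import Mathlib
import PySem

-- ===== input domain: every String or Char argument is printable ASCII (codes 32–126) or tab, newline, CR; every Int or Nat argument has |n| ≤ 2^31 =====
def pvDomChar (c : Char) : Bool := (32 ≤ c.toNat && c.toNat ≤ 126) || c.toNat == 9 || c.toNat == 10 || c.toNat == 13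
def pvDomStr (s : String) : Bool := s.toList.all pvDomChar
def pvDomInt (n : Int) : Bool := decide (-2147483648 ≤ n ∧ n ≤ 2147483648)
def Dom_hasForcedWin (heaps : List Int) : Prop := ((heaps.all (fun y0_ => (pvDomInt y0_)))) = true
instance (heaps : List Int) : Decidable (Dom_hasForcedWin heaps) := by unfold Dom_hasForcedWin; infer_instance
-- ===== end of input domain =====

-- B answers by column-wise bit counting (some bit set in an odd number of heaps) instead of A's
-- running XOR plus scan for a heap h with xor^h < h (objective: alternative algorithm).

-- ===== PORT A =====
def hasForcedWin (heaps : List Int) : Bool :=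
  -- assert heaps; assert all(i > 0)  → Pre_hasForcedWin
  if heaps.all (fun i => i == 1) then
    heaps.length % 2 == 0          -- not(len(heaps) % 2)
  else
    let xorVal := heaps.foldl (fun a h => PySem.Int.bxor a h) 0
    heaps.any (fun h => decide (PySem.Int.bxor xorVal h < h))

-- ===== PORT B =====
-- h.bit_length() for the positive h admitted by Pre_ is Nat.size h.toNat; Python's max over the
-- nonempty generator is the running max (initial 0 is below every bit length of a positive heap).
def hasForcedWin_alt (heaps : List Int) : Bool :=
  if PySem.List.max? heaps (fun y => y) == some (1 : Int) then
    heaps.length % 2 == 0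
  else
    let width := heaps.foldl (fun a h => max a h.toNat.size) 0
    (List.range width).any (fun b =>
      (heaps.foldl (fun a h => a + ((h.toNat >>> b) &&& 1)) 0) % 2 == 1)

-- ===== PRECONDITION & SPEC =====
-- Pre_ = exactly the inputs where A's two asserts pass: non-empty, all heaps positive.
def Pre_hasForcedWin (heaps : List Int) : Prop := heaps ≠ [] ∧ ∀ h ∈ heaps, 0 < h
instance (heaps : List Int) : Decidable (Pre_hasForcedWin heaps) := by unfold Pre_hasForcedWin; infer_instance
def pvWitness_hasForcedWin : List Int := [1, 2, 4]
def Spec_hasForcedWin (heaps : List Int) (out : Bool) : Prop := out = hasForcedWin_alt heaps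
instance (heaps : List Int) (out : Bool) : Decidable (Spec_hasForcedWin heaps out) := by unfold Spec_hasForcedWin; infer_instance

-- ===== CLAIM (what is proved, stated in full; the proofs are below) =====
def Claim_equal_hasForcedWin : Prop := ∀ (heaps : List Int), Dom_hasForcedWin heaps → Pre_hasForcedWin heaps → Spec_hasForcedWin heaps (hasForcedWin heaps)

-- ===== LEMMAS AND PROOFS =====

-- For a nonempty positive list, running max = 1 iff every element is 1.
theorem foldl_max_one_iff (t : List Int) (x : Int) (hx : 0 < x) (hpos : ∀ h ∈ t, 0 < h) :
    (t.foldl max x = 1) ↔ (x = 1 ∧ ∀ h ∈ t, h = 1) := by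
  induction t generalizing x with
  | nil => simp
  | cons y ys ih =>
    have hy : 0 < y := hpos y (by simp)
    rw [List.foldl_cons, ih (max x y) (lt_max_of_lt_left hx) (fun h hm => hpos h (by simp [hm]))]
    constructor
    · rintro ⟨hmax, hall⟩
      have hx1 : x ≤ 1 := le_trans (le_max_left x y) (le_of_eq hmax)
      have hy1 : y ≤ 1 := le_trans (le_max_right x y) (le_of_eq hmax)
      exact ⟨by omega, by intro h hm; rcases List.mem_cons.mp hm with rfl | hm; omega; exact hall h hm⟩
    · rintro ⟨hx1, hall⟩
      have hy1 : y = 1 := hall y (by simp)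
      exact ⟨by simp [hx1, hy1], fun h hm => hall h (by simp [hm])⟩

theorem shift_and_one (h b : Nat) : (h >>> b) &&& 1 = if h.testBit b then 1 else 0 := by
  rw [Nat.and_one_is_mod, Nat.testBit_eq_decide_div_mod_eq, Nat.shiftRight_eq_div_pow]
  rcases Nat.mod_two_eq_zero_or_one (h / 2 ^ b) with e | e <;> simp [e]

-- Column sum parity over the list = bit b of the xor fold.
theorem bitsum_parity (ns : List Nat) (b a x : Nat) (hax : (a % 2 == 1) = x.testBit b) :
    ((ns.foldl (fun a h => a + ((h >>> b) &&& 1)) a) % 2 == 1)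
      = (ns.foldl (fun a h => a ^^^ h) x).testBit b := by
  induction ns generalizing a x with
  | nil => exact hax
  | cons h t ih =>
    simp only [List.foldl_cons]
    apply ih
    rw [Nat.testBit_xor, shift_and_one, ← hax]
    cases hb : h.testBit b <;> rcases Nat.mod_two_eq_zero_or_one a with e | e <;>
      simp [e, Nat.add_mod]

theorem xor_fold_lt (ns : List Nat) (w a : Nat) (ha : a < 2 ^ w)
    (hns : ∀ n ∈ ns, n < 2 ^ w) : ns.foldl (fun a h => a ^^^ h) a < 2 ^ w := by
  induction ns generalizing a with
  | nil => exact ha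
  | cons h t ih =>
    exact ih _ (Nat.xor_lt_two_pow ha (hns h (by simp)))
      (fun n hm => hns n (by simp [hm]))

-- the Int xor-fold over nonnegative heaps is the cast of the Nat xor-fold
theorem foldl_bxor_natCast (l : List Int) (hpos : ∀ h ∈ l, 0 ≤ h) (a : Nat) :
    l.foldl (fun a h => PySem.Int.bxor a h) (a : Int)
      = ((l.map Int.toNat).foldl (fun a h => a ^^^ h) a : Nat) := by
  induction l generalizing a with
  | nil => simp
  | cons x xs ih =>
    have hx : (0:Int) ≤ x := hpos x (by simp)
    have hx' : ((x.toNat : Nat) : Int) = x := Int.toNat_of_nonneg hx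
    have : PySem.Int.bxor (a : Int) x = ((a ^^^ x.toNat : Nat) : Int) := by
      rw [← hx']; exact PySem.Int.bxor_natCast a x.toNat
    simp only [List.foldl_cons, List.map_cons, this]
    exact ih (fun h hm => hpos h (by simp [hm])) _

theorem testBit_log2_self (n : Nat) (hn : n ≠ 0) : n.testBit n.log2 = true := by
  have h1 : 2 ^ n.log2 ≤ n := Nat.log2_self_le hn
  have h2 : n < 2 ^ (n.log2 + 1) := (Nat.log2_lt hn).mp (Nat.lt_succ_self _)
  rw [Nat.testBit_eq_decide_div_mod_eq]
  have hd1 : 1 ≤ n / 2 ^ n.log2 := (Nat.one_le_div_iff (Nat.two_pow_pos _)).mpr h1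
  have hd2 : n / 2 ^ n.log2 < 2 := Nat.div_lt_of_lt_mul (by rw [pow_succ] at h2; omega)
  have : n / 2 ^ n.log2 = 1 := by omega
  simp [this]

-- if a bit of the xor-fold is set, some element has that bit set
theorem exists_testBit_of_foldl (l : List Nat) (a k : Nat)
    (h : (l.foldl (fun a h => a ^^^ h) a).testBit k = true) :
    a.testBit k = true ∨ ∃ h ∈ l, h.testBit k = true := by
  induction l generalizing a with
  | nil => exact Or.inl h
  | cons x xs ih =>
    rcases ih _ (by simpa using h) with h' | ⟨y, hy, hb⟩
    · rw [Nat.testBit_xor] at h'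
      cases hax : a.testBit k
      · right; exact ⟨x, by simp, by simp [hax] at h'; exact h'⟩
      · exact Or.inl rfl
    · exact Or.inr ⟨y, by simp [hy], hb⟩

-- some heap h satisfies x ^^^ h < h when h carries the top bit of x
theorem xor_lt_of_testBit (x h : Nat) (hx : x ≠ 0) (hb : h.testBit x.log2 = true) :
    x ^^^ h < h := by
  refine Nat.lt_of_testBit x.log2 ?_ hb ?_
  · rw [Nat.testBit_xor, testBit_log2_self x hx, hb]; rfl
  · intro j hj
    have hxj : x.testBit j = false :=
      Nat.testBit_lt_two_pow ((Nat.log2_lt hx).mp hj)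
    rw [Nat.testBit_xor, hxj]; simp

theorem hasForcedWin_spec' (heaps : List Int) (hpre : Pre_hasForcedWin heaps) :
    hasForcedWin heaps = hasForcedWin_alt heaps := by
  obtain ⟨hne, hpos⟩ := hpre
  have hnn : ∀ h ∈ heaps, (0:Int) ≤ h := fun h hm => le_of_lt (hpos h hm)
  unfold hasForcedWin hasForcedWin_alt
  obtain ⟨x0, t, rfl⟩ : ∃ x t, heaps = x :: t := by
    cases heaps with
    | nil => exact absurd rfl hne
    | cons x t => exact ⟨x, t, rfl⟩
  -- the two branch conditions agree: all-ones ↔ max = 1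
  have hcond : (PySem.List.max? (x0 :: t) (fun y => y) == some (1 : Int))
      = (x0 :: t).all (fun i => i == 1) := by
    rw [PySem.List.max?_id_cons]
    have hiff := foldl_max_one_iff t x0 (hpos x0 (by simp)) (fun h hm => hpos h (by simp [hm]))
    rw [Bool.eq_iff_iff]
    simp only [beq_iff_eq, Option.some.injEq, List.all_eq_true, List.forall_mem_cons]
    rw [hiff]
  rw [hcond]
  by_cases hall : (x0 :: t).all (fun i => i == 1) = true
  · simp [hall]
  · simp only [hall, Bool.false_eq_true, if_false]
    set ns := (x0 :: t).map Int.toNat with hns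
    set x : Nat := ns.foldl (fun a h => a ^^^ h) 0 with hxdef
    have hcast : (x0 :: t).foldl (fun a h => PySem.Int.bxor a h) 0 = (x : Int) := by
      have h0 := foldl_bxor_natCast (x0 :: t) hnn 0
      rw [Nat.cast_zero] at h0
      exact h0
    rw [hcast]
    set width := (x0 :: t).foldl (fun a h => max a h.toNat.size) 0 with hwidth
    -- A's scan is decide (x ≠ 0)
    have hAside : (x0 :: t).any (fun h => decide (PySem.Int.bxor (x : Nat) h < h))
        = decide (x ≠ 0) := by
      by_cases hx0 : x = 0
      · rw [hx0]
        simp only [Nat.cast_zero]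
        have hz : ∀ h ∈ (x0 :: t), PySem.Int.bxor 0 h = h := by
          intro h hm
          rw [PySem.Int.bxor_comm]
          simp [PySem.Int.bxor_zero]
        rw [List.any_eq_false.mpr (by intro h hm; simp [hz h hm])]
        simp
      · have hbit : x.testBit x.log2 = true := testBit_log2_self x hx0
        rcases exists_testBit_of_foldl ns 0 x.log2 (hxdef ▸ hbit) with h0 | ⟨hn, hmem, hb⟩
        · simp at h0
        · rcases List.mem_map.mp hmem with ⟨h, hm, rfl⟩
          have hnn' : ((h.toNat : Nat) : Int) = h := Int.toNat_of_nonneg (hnn h hm)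
          have hlt : x ^^^ h.toNat < h.toNat := xor_lt_of_testBit x h.toNat hx0 hb
          have : PySem.Int.bxor (x : Int) h < h := by
            rw [← hnn', PySem.Int.bxor_natCast]
            exact_mod_cast hlt
          rw [List.any_eq_true.mpr ⟨h, hm, by simpa using this⟩]
          simp [hx0]
    -- B's column scan is decide (x ≠ 0) too
    have hparity : ∀ b, (((x0 :: t).foldl (fun a h => a + ((h.toNat >>> b) &&& 1)) 0) % 2 == 1)
        = x.testBit b := by
      intro b
      have hm : ns.foldl (fun a h => a + ((h >>> b) &&& 1)) 0
          = (x0 :: t).foldl (fun a h => a + ((h.toNat >>> b) &&& 1)) 0 := by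
        rw [hns, List.foldl_map]
      rw [← hm, hxdef]
      exact bitsum_parity ns b 0 0 (by simp)
    have hBside : (List.range width).any
          (fun b => ((x0 :: t).foldl (fun a h => a + ((h.toNat >>> b) &&& 1)) 0) % 2 == 1)
        = decide (x ≠ 0) := by
      simp only [hparity]
      by_cases hx0 : x = 0
      · simp [hx0]
      · have hbound : ∀ n ∈ ns, n < 2 ^ width := by
          intro n hmem
          rcases List.mem_map.mp hmem with ⟨h, hm, rfl⟩
          have hsz : h.toNat.size ≤ width :=
            (PySem.List.le_foldl_max_nat (x0 :: t) (fun h => h.toNat.size) 0).2 h hm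
          exact lt_of_lt_of_le (Nat.lt_size_self _) (Nat.pow_le_pow_right (by omega) hsz)
        have hlt : x < 2 ^ width := xor_fold_lt ns width 0 (Nat.two_pow_pos _) hbound
        have hlg : x.log2 < width := (Nat.log2_lt hx0).mpr hlt
        rw [List.any_eq_true.mpr ⟨x.log2, List.mem_range.mpr hlg, testBit_log2_self x hx0⟩]
        simp [hx0]
    rw [hAside, hBside]

-- ===== VERDICT (by name: the statement is the Claim_ definition above) =====
theorem hasForcedWin_spec : Claim_equal_hasForcedWin := by
  intro heaps _ hpre
  exact hasForcedWin_spec' heaps hpre
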